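-- pv_equiv track=rewrite | github.com/krailis/99-Problems | Python/Lists/p21_to_p28_solutions/solutions_21_28.py | s28_sortLists_a
-- ===== SOURCE A (Python) =====
-- def s28_sortLists_a (list_a):
-- 	indexLength = []
-- 	sortedList = []
-- 	for i, x in enumerate(list_a):
-- 		indexLength.append([len(x), i])
-- 	indexLength.sort();
-- 	for x in indexLength:
-- 		sortedList.append(list_a[x[-1]])
-- 	return sortedList
-- ===== SOURCE B (Python) =====
-- def s28_sortLists_a(list_a):
-- 	buckets = {}
-- 	for x in list_a:
-- 		buckets.setdefault(len(x), []).append(x)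
-- 	result = []
-- 	for k in sorted(buckets):
-- 		result.extend(buckets[k])
-- 	return result
-- ===== Notes on version B (the rewrite author's own statement) =====
-- stated objective: alternative
-- what changed: Replaces A's decorate-sort-undecorate ([len,i] pairs, lexicographic comparison sort, then re-indexing) with a single-pass bucket grouping into a dict keyed by length, concatenating buckets in ascending key order.
import Mathlib
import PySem

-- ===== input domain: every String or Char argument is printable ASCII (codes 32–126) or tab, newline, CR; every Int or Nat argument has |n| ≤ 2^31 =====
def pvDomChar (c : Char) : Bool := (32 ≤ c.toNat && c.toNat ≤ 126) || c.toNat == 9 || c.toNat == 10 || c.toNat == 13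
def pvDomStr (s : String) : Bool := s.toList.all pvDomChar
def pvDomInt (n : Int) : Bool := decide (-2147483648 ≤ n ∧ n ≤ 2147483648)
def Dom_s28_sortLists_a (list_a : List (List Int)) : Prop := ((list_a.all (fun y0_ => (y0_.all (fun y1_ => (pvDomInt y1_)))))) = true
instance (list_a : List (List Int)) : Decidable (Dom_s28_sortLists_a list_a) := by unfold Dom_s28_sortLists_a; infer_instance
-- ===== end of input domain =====

-- B replaces A's decorate-sort-undecorate ([len(x), i] pairs, lexicographic comparison sort,
-- then re-indexing) with a one-pass bucket grouping by length, concatenated in ascending key order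
-- (alternative decomposition; same return value).


-- ===== PORT A =====
-- The two-element Python lists [len(x), i] are ported as pairs (len, i) — all entries have
-- length 2, so Python's lexicographic list sort is exactly the lexicographic pair sort, ported
-- with PySem.List.sorted2 (Python's tuple-key sort); x[-1] is the pair's second component;
-- list_a[x[-1]] via pyGet? (the index is always in range here), totalized with .getD [].
def s28_sortLists_a (list_a : List (List Int)) : List (List Int) :=
  let indexLength := (PySem.List.enumerate list_a).foldl
      (fun acc p => acc ++ [((p.2.length : Int), p.1)]) []
  let sortedIL := PySem.List.sorted2 indexLength (fun x => x.1) (fun x => x.2) false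
  sortedIL.foldl (fun acc x => acc ++ [(PySem.List.pyGet? list_a x.2).getD []]) []

-- ===== PORT B =====
-- buckets.setdefault(len(x), []).append(x)  =  modify (len x) [] (· ++ [x]);
-- buckets[k] for k iterated over sorted(buckets) is getD k [] (k is always a present key).
def s28_sortLists_a_alt (list_a : List (List Int)) : List (List Int) :=
  let buckets := list_a.foldl
      (fun d x => d.modify ((x.length : Int)) [] (fun v => v ++ [x])) PySem.Dict.empty
  (PySem.List.sorted buckets.keys (fun k => k) false).foldl
      (fun out k => out ++ buckets.getD k []) []

-- ===== PRECONDITION & SPEC =====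
def Spec_s28_sortLists_a (list_a : List (List Int)) (out : List (List Int)) : Prop := out = s28_sortLists_a_alt list_a
instance (list_a : List (List Int)) (out : List (List Int)) : Decidable (Spec_s28_sortLists_a list_a out) := by unfold Spec_s28_sortLists_a; infer_instance

-- ===== CLAIM (what is proved, stated in full; the proofs are below) =====
def Claim_equal_s28_sortLists_a : Prop := ∀ (list_a : List (List Int)), Dom_s28_sortLists_a list_a → Spec_s28_sortLists_a list_a (s28_sortLists_a list_a)

-- ===== LEMMAS AND PROOFS =====

-- insertBy only compares the inserted element against list members
theorem pvInsertBy_congr {α : Type} (b1 b2 : α → α → Bool) (x : α) (ys : List α)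
    (h : ∀ y ∈ ys, b1 x y = b2 x y) :
    PySem.List.insertBy b1 x ys = PySem.List.insertBy b2 x ys := by
  induction ys with
  | nil => rfl
  | cons y ys ih =>
    simp only [PySem.List.insertBy, h y (List.mem_cons_self)]
    split
    · rfl
    · simp only [List.cons.injEq, true_and]
      exact ih (fun z hz => h z (List.mem_cons_of_mem _ hz))

theorem pvFoldl_insertBy_congr {α : Type} (b1 b2 : α → α → Bool) (xs acc : List α)
    (h : ∀ x ∈ xs, ∀ y, (y ∈ acc ∨ y ∈ xs) → b1 x y = b2 x y) :
    xs.foldl (fun acc x => PySem.List.insertBy b1 x acc) acc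
      = xs.foldl (fun acc x => PySem.List.insertBy b2 x acc) acc := by
  induction xs generalizing acc with
  | nil => rfl
  | cons x xs ih =>
    simp only [List.foldl_cons]
    rw [pvInsertBy_congr b1 b2 x acc (fun y hy => h x List.mem_cons_self y (Or.inl hy))]
    refine ih _ ?_
    intro x' hx' y hy
    refine h x' (List.mem_cons_of_mem _ hx') y ?_
    rcases hy with hy | hy
    · rcases (PySem.List.mem_insertBy b2 x y acc).1 hy with rfl | hy
      · exact Or.inr List.mem_cons_self
      · exact Or.inl hy
    · exact Or.inr (List.mem_cons_of_mem _ hy)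

-- Python's tuple sort equals a single-key sort whenever the comparisons agree on the list
theorem pvSorted2_eq_sorted {α : Type} (xs : List α) (k1 k2 : α → Int) (enc : α → Int)
    (h : ∀ a ∈ xs, ∀ b ∈ xs,
      (decide (k1 a < k1 b) || (!decide (k1 b < k1 a) && decide (k2 a < k2 b)))
        = decide (enc a < enc b)) :
    PySem.List.sorted2 xs k1 k2 false = PySem.List.sorted xs enc false := by
  show xs.foldl (fun acc x => PySem.List.insertBy
      (fun a b => decide (k1 a < k1 b) || (!decide (k1 b < k1 a) && decide (k2 a < k2 b))) x acc) []
    = xs.foldl (fun acc x => PySem.List.insertBy (fun a b => decide (enc a < enc b)) x acc) []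
  refine pvFoldl_insertBy_congr _ _ xs [] ?_
  intro x hx y hy
  rcases hy with hy | hy
  · cases hy
  · exact h x hx y hy

-- concatenating the per-key filters over a duplicate-free cover of the keys is a permutation
theorem pvFlatMap_filter_perm (ks : List Int) (P : List (Int × Int))
    (hnd : ks.Nodup) (hmem : ∀ p ∈ P, p.1 ∈ ks) :
    (ks.flatMap (fun k => P.filter (fun p => p.1 == k))).Perm P := by
  induction ks generalizing P with
  | nil =>
    have : P = [] := List.eq_nil_iff_forall_not_mem.2 (fun p hp => by simpa using hmem p hp)
    simp [this]
  | cons k ks ih =>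
    rw [List.flatMap_cons]
    have hks : ∀ k' ∈ ks, P.filter (fun p => p.1 == k')
        = (P.filter (fun p => !(p.1 == k))).filter (fun p => p.1 == k') := by
      intro k' hk'
      rw [List.filter_filter]
      refine List.filter_congr ?_
      intro p _
      by_cases hpk : p.1 = k'
      · have : ¬ (p.1 = k) := by
          rintro rfl; exact (List.nodup_cons.1 hnd).1 (hpk ▸ hk')
        simp [hpk]; exact fun h => this (hpk.trans h)
      · simp [hpk]
    have hcong : ks.flatMap (fun k' => P.filter (fun p => p.1 == k'))
        = ks.flatMap (fun k' => (P.filter (fun p => !(p.1 == k))).filter (fun p => p.1 == k')) := by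
      apply List.flatMap_congr
      intro k' hk'
      exact hks k' hk'
    rw [hcong]
    have hperm := ih (P.filter (fun p => !(p.1 == k))) (List.nodup_cons.1 hnd).2 ?_
    · exact ((hperm.append_left (P.filter (fun p => p.1 == k))).trans
        (List.filter_append_perm _ P))
    · intro p hp
      have hpP := List.mem_filter.1 hp
      have := hmem p hpP.1
      rcases List.mem_cons.1 this with h | h
      · simp [h] at hpP
      · exact h

theorem s28_main (L : List (List Int)) : s28_sortLists_a L = s28_sortLists_a_alt L := by
  -- notation
  have hE : PySem.List.enumerate L = PySem.List.enumerate L 0 := rfl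
  set N : Int := (L.length : Int) with hN
  set E : List (Int × List Int) := PySem.List.enumerate L 0 with hEdef
  set f1 : Int × List Int → Int × Int := fun q => ((q.2.length : Int), q.1) with hf1
  set P : List (Int × Int) := E.map f1 with hP
  set enc : Int × Int → Int := fun p => p.1 * N + p.2 with henc
  set g : Int × Int → List Int := fun x => (PySem.List.pyGet? L x.2).getD [] with hg
  set Ks : List Int := PySem.Set.ofList (L.map (fun x => (x.length : Int))) with hKs
  set sortedKs : List Int := PySem.List.sorted Ks (fun k => k) false with hSK
  -- bounds on members of P
  have hPb : ∀ p ∈ P, 0 ≤ p.1 ∧ 0 ≤ p.2 ∧ p.2 < N := by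
    intro p hp
    obtain ⟨q, hq, rfl⟩ := List.mem_map.1 hp
    obtain ⟨k, hk, rfl⟩ := (PySem.List.mem_enumerate_iff L 0 q).1 hq
    simp only [hf1]
    exact ⟨by positivity, by omega, by simp only [hN]; omega⟩
  -- arithmetic core: enc is lexicographic on P's members
  have hlt : ∀ a b : Int × Int, 0 ≤ a.2 → a.2 < N → 0 ≤ b.2 → a.1 < b.1 → enc a < enc b := by
    intro a b h1 h2 h3 h4
    have hmul : (a.1 + 1) * N ≤ b.1 * N :=
      mul_le_mul_of_nonneg_right (by omega) (by omega)
    have hexp : (a.1 + 1) * N = a.1 * N + N := by ring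
    simp only [henc]
    linarith
  -- Step A: unfold port A
  have hA : s28_sortLists_a L
      = (PySem.List.sorted2 P (fun x => x.1) (fun x => x.2) false).map g := by
    simp only [s28_sortLists_a, PySem.List.foldl_append_singleton_eq_map, List.nil_append,
      ← hEdef, ← hf1, ← hP, ← hg]
  -- Step B: unfold port B
  set f2 : List Int → Int × List Int := fun x => ((x.length : Int), x) with hf2
  have hbuck : (L.foldl (fun d x => d.modify ((x.length : Int)) [] (fun v => v ++ [x]))
      PySem.Dict.empty)
      = (L.map f2).foldl (fun d p => d.modify p.1 [] (fun v => v ++ [p.2])) PySem.Dict.empty := by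
    rw [List.foldl_map]
  have hkeys : ((L.foldl (fun d x => d.modify ((x.length : Int)) [] (fun v => v ++ [x]))
      PySem.Dict.empty)).keys = Ks := by
    rw [PySem.Dict.keys_foldl_modify_key L (fun x => (x.length : Int)) [] (fun _ x v => v ++ [x])
      PySem.Dict.empty]
    simp [PySem.Set.update_nil_left, hKs]
  have hgetD : ∀ k : Int, (L.foldl (fun d x => d.modify ((x.length : Int)) [] (fun v => v ++ [x]))
      PySem.Dict.empty).getD k []
      = ((L.map f2).filter (fun p => p.1 == k)).map (fun p => p.2) := by
    intro k
    rw [hbuck, PySem.Dict.getD_foldl_modify_append, PySem.Dict.getD_empty, List.nil_append]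
  have hB : s28_sortLists_a_alt L
      = sortedKs.flatMap (fun k => ((L.map f2).filter (fun p => p.1 == k)).map (fun p => p.2)) := by
    simp only [s28_sortLists_a_alt, hkeys, ← hSK, PySem.List.foldl_append_eq_flatMap,
      List.nil_append]
    exact List.flatMap_congr (fun k _ => hgetD k)
  -- Step C: properties of sortedKs
  have hKnd : sortedKs.Nodup :=
    ((PySem.List.sorted_perm Ks (fun k => k) false).symm).nodup (PySem.Set.nodup_ofList _)
  have hKlt : sortedKs.Pairwise (· < ·) := by
    have hle := PySem.List.sorted_pairwise Ks (fun k => k)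
    have hne : sortedKs.Pairwise (· ≠ ·) := hKnd
    exact (hle.and hne).imp (fun h => lt_of_le_of_ne h.1 h.2)
  have hcover : ∀ p ∈ P, p.1 ∈ sortedKs := by
    intro p hp
    obtain ⟨q, hq, rfl⟩ := List.mem_map.1 hp
    have hq2 : q.2 ∈ L := by
      have := List.mem_map_of_mem (f := fun r => r.2) hq
      rwa [PySem.List.map_snd_enumerate] at this
    have : (q.2.length : Int) ∈ Ks := by
      rw [hKs, PySem.Set.mem_ofList]
      exact List.mem_map_of_mem hq2
    exact ((PySem.List.sorted_perm Ks (fun k => k) false).mem_iff).2 this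
  -- Step D: the bucket concatenation is the sorted order of P under enc
  set SB : List (Int × Int) := sortedKs.flatMap (fun k => P.filter (fun p => p.1 == k)) with hSB
  have hperm : SB.Perm P := pvFlatMap_filter_perm sortedKs P hKnd hcover
  have hPp2 : P.Pairwise (fun a b => a.2 < b.2) := by
    rw [hP, List.pairwise_map]
    exact PySem.List.pairwise_lt_enumerate L 0
  have hpw : SB.Pairwise (fun a b => enc a < enc b) := by
    rw [hSB, List.pairwise_flatMap]
    constructor
    · intro k _
      refine (hPp2.filter _).imp_of_mem ?_
      intro a b ha hb hab
      have ha' := List.mem_filter.1 ha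
      have hb' := List.mem_filter.1 hb
      have hak : a.1 = k := by simpa using ha'.2
      have hbk : b.1 = k := by simpa using hb'.2
      simp only [henc]
      rw [hak, hbk]
      linarith
    · refine hKlt.imp ?_
      intro k k' hkk' x hx y hy
      have hx' := List.mem_filter.1 hx
      have hy' := List.mem_filter.1 hy
      have hxk : x.1 = k := by simpa using hx'.2
      have hyk : y.1 = k' := by simpa using hy'.2
      obtain ⟨_, hx2, hx3⟩ := hPb x hx'.1
      obtain ⟨_, hy2, _⟩ := hPb y hy'.1
      exact hlt x y hx2 hx3 hy2 (by omega)
  have hsorted : PySem.List.sorted P enc = SB :=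
    PySem.List.sorted_eq_of_perm_of_pairwise_lt P SB enc hperm hpw
  -- Step E: sorted2 on P is the enc-sort
  have hs2 : PySem.List.sorted2 P (fun x => x.1) (fun x => x.2) false
      = PySem.List.sorted P enc false := by
    refine pvSorted2_eq_sorted P _ _ enc ?_
    intro a ha b hb
    obtain ⟨ha1, ha2, ha3⟩ := hPb a ha
    obtain ⟨hb1, hb2, hb3⟩ := hPb b hb
    by_cases h1 : a.1 < b.1
    · have := hlt a b ha2 ha3 hb2 h1
      simp [h1, this]
    · by_cases h2 : b.1 < a.1
      · have := hlt b a hb2 hb3 ha2 h2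
        simp [h1, h2, not_lt.2 (le_of_lt this)]
      · have heq : a.1 = b.1 := by omega
        by_cases h3 : a.2 < b.2
        · have : enc a < enc b := by simp only [henc]; rw [heq]; linarith
          simp [h1, h2, h3, this]
        · have : ¬ enc a < enc b := by simp only [henc]; rw [heq]; omega
          simp [h1, h2, h3, this]
  -- Step F: blockwise equality of the two flatMaps
  have hblock : ∀ k : Int, (P.filter (fun p => p.1 == k)).map g
      = ((L.map f2).filter (fun p => p.1 == k)).map (fun p => p.2) := by
    intro k
    have hLf2 : L.map f2 = E.map (fun q => ((q.2.length : Int), q.2)) := by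
      conv_lhs => rw [← PySem.List.map_snd_enumerate L 0, List.map_map, ← hEdef]
      rfl
    rw [hLf2, hP, List.filter_map, List.filter_map, List.map_map, List.map_map]
    have hpred : ((fun p : Int × Int => p.1 == k) ∘ f1)
        = ((fun p : Int × List Int => p.1 == k) ∘ (fun q => ((q.2.length : Int), q.2))) := rfl
    rw [hpred]
    refine List.map_congr_left ?_
    intro q hq
    have hqE : q ∈ E := (List.mem_filter.1 hq).1
    obtain ⟨j, hj, rfl⟩ := (PySem.List.mem_enumerate_iff L 0 q).1 hqE
    simp only [Function.comp, hg, hf1, zero_add]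
    rw [PySem.List.pyGet?_natCast]
    simp [List.getElem?_eq_getElem hj]
  -- assemble
  rw [hA, hs2, hsorted, hB, hSB, List.map_flatMap]
  exact List.flatMap_congr (fun k _ => hblock k)

-- ===== VERDICT (by name: the statement is the Claim_ definition above) =====
theorem s28_sortLists_a_spec : Claim_equal_s28_sortLists_a := by
  intro list_a _
  show s28_sortLists_a list_a = s28_sortLists_a_alt list_a
  exact s28_main list_a
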